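-- pv_equiv track=rewrite | github.com/riku546/python | atcoder/ABC057/c.py | digits_example
-- ===== SOURCE A (Python) =====
-- def digits_example(N):
--     temp = []
--
--     for i in range(1, int(N**0.5) + 1):
--         if N % i == 0:
--             temp.append(max((len(str(i)), len(str(N // i)))))
--
--     if len(temp) == 0:
--         return len(str(N))
--
--     return min(temp)
-- ===== SOURCE B (Python) =====
-- def digits_example(N):
--     # reverse early-exit scan: first divisor found from int(sqrt(N)) downward
--     # already yields the minimal digit length of the pair-maximum
--     i = int(N ** 0.5)
--     while i > 0:
--         if N % i == 0:
--             return len(str(N // i))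
--         i -= 1
--     return len(str(N))
-- ===== Notes on version B (the rewrite author's own statement) =====
-- stated objective: simpler
-- what changed: Instead of collecting max(len(i),len(N//i)) for every divisor up to sqrt(N) into a list and taking its min, B scans downward from int(sqrt(N)) and returns len(str(N//i)) at the first divisor it meets (the pair-max is always len(str(N//i)) and is minimal at the largest i), with no list and no min.
import Mathlib
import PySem

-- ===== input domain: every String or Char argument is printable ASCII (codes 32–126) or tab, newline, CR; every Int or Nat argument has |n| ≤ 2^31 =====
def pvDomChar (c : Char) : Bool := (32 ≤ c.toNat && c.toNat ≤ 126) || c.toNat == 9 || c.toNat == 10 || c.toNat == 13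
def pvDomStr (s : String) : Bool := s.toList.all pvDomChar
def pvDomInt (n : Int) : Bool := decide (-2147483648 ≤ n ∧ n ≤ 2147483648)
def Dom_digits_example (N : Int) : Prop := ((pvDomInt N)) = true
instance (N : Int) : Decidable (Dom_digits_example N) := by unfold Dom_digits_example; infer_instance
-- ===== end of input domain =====

-- B replaces A's collect-all-maxima-then-min with a downward early-exit scan from int(sqrt(N)); objective: simpler.

-- ===== PORT A =====
-- int(N**0.5) is ported as Nat.sqrt: exact for 0 ≤ N ≤ 2^31 (checked against CPython); Pre_ requires 0 ≤ N.
def digits_example (N : Int) : Int :=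
  let r : Int := ((Nat.sqrt N.toNat : Nat) : Int)
  let temp : List Int :=
    (PySem.List.pyRange 1 (r + 1) 1).foldl
      (fun temp i =>
        if PySem.Int.mod N i == 0 then
          temp ++ [max (PySem.Str.len (PySem.Int.toStr i))
                       (PySem.Str.len (PySem.Int.toStr (PySem.Int.floordiv N i)))]
        else temp) []
  if PySem.List.len temp == 0 then PySem.Str.len (PySem.Int.toStr N)
  else (PySem.List.min? temp (fun x => x)).getD 0

-- ===== PORT B =====
-- the while-loop of Source B counting i down from int(sqrt(N)) to 1, returning at the first divisor
def altLoop (N : Int) : Nat → Int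
  | 0 => PySem.Str.len (PySem.Int.toStr N)
  | k + 1 =>
    if PySem.Int.mod N ((k : Int) + 1) == 0 then
      PySem.Str.len (PySem.Int.toStr (PySem.Int.floordiv N ((k : Int) + 1)))
    else altLoop N k

def digits_example_alt (N : Int) : Int := altLoop N (Nat.sqrt N.toNat)

-- ===== PRECONDITION & SPEC =====
-- Pre_ excludes N < 0, where Python A raises TypeError (int() of the complex number N**0.5).
def Pre_digits_example (N : Int) : Prop := 0 ≤ N
instance (N : Int) : Decidable (Pre_digits_example N) := by unfold Pre_digits_example; infer_instance
def pvWitness_digits_example : Int := 12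

def Spec_digits_example (N : Int) (out : Int) : Prop := out = digits_example_alt N
instance (N : Int) (out : Int) : Decidable (Spec_digits_example N out) := by unfold Spec_digits_example; infer_instance

-- ===== CLAIM (what is proved, stated in full; the proofs are below) =====
def Claim_equal_digits_example : Prop := ∀ (N : Int), Dom_digits_example N → Pre_digits_example N → Spec_digits_example N (digits_example N)

-- ===== LEMMAS AND PROOFS =====

-- digit-string length of a natural number is log₁₀ + 1
lemma toDigitsCore_len10 : ∀ (f n : Nat) (l : List Char), n < f →
    (Nat.toDigitsCore 10 f n l).length = Nat.log 10 n + 1 + l.length := by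
  intro f
  induction f with
  | zero => intro n l h; omega
  | succ f ih =>
    intro n l h
    show (if n / 10 = 0 then _ :: l else Nat.toDigitsCore 10 f (n / 10) (_ :: l)).length = _
    by_cases h10 : n / 10 = 0
    · have hn : n < 10 := by omega
      rw [if_pos h10, Nat.log_eq_zero_iff.mpr (Or.inl hn)]
      simp [Nat.add_comm]
    · rw [if_neg h10]
      have hlt : n / 10 < f := by
        have := Nat.div_lt_self (by omega : 0 < n) (by omega : 1 < 10)
        omega
      rw [ih (n / 10) _ hlt]
      have hge : 10 ≤ n := by
        by_contra hc
        exact h10 (Nat.div_eq_of_lt (by omega))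
      have hpos : 0 < Nat.log 10 n := Nat.log_pos (by omega) hge
      have := Nat.log_div_base 10 n
      simp only [List.length_cons]
      omega

lemma len10 (n : Nat) : (Nat.toDigits 10 n).length = Nat.log 10 n + 1 := by
  have := toDigitsCore_len10 (n + 1) n [] (by omega)
  simpa [Nat.toDigits] using this

-- len(str(x)) for 0 ≤ x
lemma lenStr_eq (x : Int) (hx : 0 ≤ x) :
    PySem.Str.len (PySem.Int.toStr x) = ((Nat.log 10 x.toNat + 1 : Nat) : Int) := by
  rw [PySem.Str.len_eq, PySem.Int.toList_toStr]
  simp [PySem.Int.toChars, not_lt.mpr hx, len10]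

lemma lenStr_mono {a b : Int} (ha : 0 ≤ a) (hab : a ≤ b) :
    PySem.Str.len (PySem.Int.toStr a) ≤ PySem.Str.len (PySem.Int.toStr b) := by
  rw [lenStr_eq a ha, lenStr_eq b (le_trans ha hab)]
  have : a.toNat ≤ b.toNat := Int.toNat_le_toNat hab
  exact_mod_cast Nat.succ_le_succ (Nat.log_mono_right this)

lemma ediv_anti {N d e : Int} (hN : 0 ≤ N) (hd : 0 < d) (hde : d ≤ e) :
    N / e ≤ N / d := by
  have he : (0:Int) < e := lt_of_lt_of_le hd hde
  rw [Int.le_ediv_iff_mul_le hd]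
  calc N / e * d ≤ N / e * e :=
        mul_le_mul_of_nonneg_left hde (Int.ediv_nonneg hN (le_of_lt he))
    _ ≤ N := Int.ediv_mul_le N (ne_of_gt he)

-- the pair-max collapses to len(str(N//i)) for a divisor i below the square root
lemma max_collapse {N i : Int} (hi : 1 ≤ i) (hii : i * i ≤ N) :
    max (PySem.Str.len (PySem.Int.toStr i))
        (PySem.Str.len (PySem.Int.toStr (PySem.Int.floordiv N i))) =
    PySem.Str.len (PySem.Int.toStr (PySem.Int.floordiv N i)) := by
  have hipos : (0:Int) < i := by omega
  have hle : i ≤ N / i := (Int.le_ediv_iff_mul_le hipos).mpr hii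
  rw [PySem.Int.floordiv_eq_ediv_of_pos hipos]
  exact max_eq_right (lenStr_mono (by omega) hle)

-- the list A accumulates, as filter-then-map over the range
def lstA (N : Int) (k : Nat) : List Int :=
  ((PySem.List.pyRange 1 ((k : Int) + 1) 1).filter (fun i => PySem.Int.mod N i == 0)).map
    (fun i => max (PySem.Str.len (PySem.Int.toStr i))
                  (PySem.Str.len (PySem.Int.toStr (PySem.Int.floordiv N i))))

lemma lstA_succ (N : Int) (k : Nat) :
    lstA N (k + 1) = lstA N k ++
      (if PySem.Int.mod N ((k : Int) + 1) == 0 then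
        [max (PySem.Str.len (PySem.Int.toStr ((k : Int) + 1)))
             (PySem.Str.len (PySem.Int.toStr (PySem.Int.floordiv N ((k : Int) + 1))))]
       else []) := by
  unfold lstA
  rw [show (((k + 1 : Nat) : Int) + 1) = ((k : Int) + 1) + 1 by push_cast; ring,
      PySem.List.pyRange_one_succ_right (by omega), List.filter_append, List.map_append,
      List.filter_singleton]
  by_cases hdvd : (PySem.Int.mod N ((k : Int) + 1) == 0) = true
  · rw [if_pos hdvd, hdvd, Bool.cond_true, List.map_singleton]
  · have hf : (PySem.Int.mod N ((k : Int) + 1) == 0) = false := by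
      simpa using hdvd
    rw [if_neg hdvd, hf, Bool.cond_false, List.map_nil]

lemma mem_lstA {N : Int} {k : Nat} {x : Int} :
    x ∈ lstA N k ↔ ∃ i : Int, 1 ≤ i ∧ i ≤ (k : Int) ∧ PySem.Int.mod N i = 0 ∧
      x = max (PySem.Str.len (PySem.Int.toStr i))
              (PySem.Str.len (PySem.Int.toStr (PySem.Int.floordiv N i))) := by
  unfold lstA
  simp only [List.mem_map, List.mem_filter, PySem.List.mem_pyRange_one]
  constructor
  · rintro ⟨i, ⟨⟨h1, h2⟩, h3⟩, rfl⟩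
    exact ⟨i, h1, by omega, by simpa using h3, rfl⟩
  · rintro ⟨i, h1, h2, h3, rfl⟩
    exact ⟨i, ⟨⟨h1, by omega⟩, by simpa using h3⟩, rfl⟩

-- main loop invariant: B's value is a member of A's list and a lower bound for it
lemma main_inv (N : Int) (hN : 1 ≤ N) :
    ∀ (k : Nat), 1 ≤ k → k ≤ Nat.sqrt N.toNat →
      altLoop N k ∈ lstA N k ∧
      (∀ d : Int, 1 ≤ d → d ≤ (k : Int) → PySem.Int.mod N d = 0 →
        altLoop N k ≤ PySem.Str.len (PySem.Int.toStr (PySem.Int.floordiv N d))) := by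
  intro k
  induction k with
  | zero => omega
  | succ k ih =>
    intro _ hks
    have hsq : ((k : Int) + 1) * ((k : Int) + 1) ≤ N := by
      have h1 : (k + 1) * (k + 1) ≤ N.toNat := Nat.le_sqrt.mp hks
      have h1' : (((k + 1) * (k + 1) : Nat) : Int) ≤ (N.toNat : Int) := by exact_mod_cast h1
      rw [Int.toNat_of_nonneg (by omega : (0:Int) ≤ N)] at h1'
      push_cast at h1'
      exact h1'
    by_cases hdvd : PySem.Int.mod N ((k : Int) + 1) = 0
    · have hb : (PySem.Int.mod N ((k : Int) + 1) == 0) = true := beq_iff_eq.mpr hdvd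
      have halt : altLoop N (k + 1) =
          PySem.Str.len (PySem.Int.toStr (PySem.Int.floordiv N ((k : Int) + 1))) := by
        simp only [altLoop]
        rw [if_pos hb]
      constructor
      · rw [lstA_succ, if_pos hb, halt, max_collapse (by omega) hsq]
        exact List.mem_append_right _ (List.mem_singleton.mpr rfl)
      · intro d hd1 hd2 hdN
        rw [halt, PySem.Int.floordiv_eq_ediv_of_pos (by omega : (0:Int) < (k : Int) + 1),
            PySem.Int.floordiv_eq_ediv_of_pos (by omega : (0:Int) < d)]
        exact lenStr_mono (Int.ediv_nonneg (by omega) (by omega))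
          (ediv_anti (by omega) (by omega) (by push_cast at hd2 ⊢; omega))
    · have hb : ¬ (PySem.Int.mod N ((k : Int) + 1) == 0) = true :=
        fun h => hdvd (beq_iff_eq.mp h)
      have hkpos : 1 ≤ k := by
        rcases Nat.eq_zero_or_pos k with h | h
        · exfalso; subst h
          have : ((1:Int)) ∣ N := one_dvd N
          rw [show ((0:Nat):Int) + 1 = (1:Int) by norm_num] at hdvd
          exact hdvd ((PySem.Int.mod_eq_zero_iff_dvd N 1).mpr this)
        · exact h
      have hks' : k ≤ Nat.sqrt N.toNat := by omega
      obtain ⟨ihm, ihb⟩ := ih hkpos hks'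
      have halt : altLoop N (k + 1) = altLoop N k := by
        simp only [altLoop]
        rw [if_neg hb]
      constructor
      · rw [lstA_succ, if_neg hb, halt, List.append_nil]
        exact ihm
      · intro d hd1 hd2 hdN
        rcases eq_or_lt_of_le hd2 with heq | hlt
        · exfalso
          push_cast at heq
          rw [heq] at hdN
          exact hdvd (by exact_mod_cast hdN)
        · rw [halt]
          exact ihb d hd1 (by push_cast at hlt ⊢; omega) hdN

-- A's fold result is lstA at the square root
lemma temp_eq (N : Int) :
    (PySem.List.pyRange 1 (((Nat.sqrt N.toNat : Nat) : Int) + 1) 1).foldl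
      (fun temp i =>
        if PySem.Int.mod N i == 0 then
          temp ++ [max (PySem.Str.len (PySem.Int.toStr i))
                       (PySem.Str.len (PySem.Int.toStr (PySem.Int.floordiv N i)))]
        else temp) [] = lstA N (Nat.sqrt N.toNat) := by
  rw [PySem.List.foldl_append_if]
  rfl

-- ===== VERDICT (by name: the statement is the Claim_ definition above) =====
theorem digits_example_spec : Claim_equal_digits_example := by
  intro N _ hPre
  unfold Spec_digits_example digits_example digits_example_alt
  simp only []
  rw [temp_eq]
  rcases eq_or_lt_of_le hPre with h0 | h1
  · -- N = 0 : sqrt = 0, empty range, fallback branch on both sides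
    subst h0
    decide
  · -- N ≥ 1
    have hN : 1 ≤ N := h1
    have hs1 : 1 ≤ Nat.sqrt N.toNat := by
      rw [Nat.le_sqrt]
      omega
    obtain ⟨hmem, hlb⟩ := main_inv N hN (Nat.sqrt N.toNat) hs1 (le_refl _)
    have hne : lstA N (Nat.sqrt N.toNat) ≠ [] := by
      intro h
      rw [h] at hmem
      exact absurd hmem (List.not_mem_nil)
    -- min? is some
    obtain ⟨m, hm⟩ : ∃ m, PySem.List.min? (lstA N (Nat.sqrt N.toNat)) (fun x => x) = some m := by
      cases hmin : PySem.List.min? (lstA N (Nat.sqrt N.toNat)) (fun x => x) with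
      | none => exact absurd ((PySem.List.min?_eq_none_iff _ _).mp hmin) hne
      | some m => exact ⟨m, rfl⟩
    have hlen : ¬ (PySem.List.len (lstA N (Nat.sqrt N.toNat)) == 0) = true := by
      rw [PySem.List.len_eq]
      simp only [beq_iff_eq]
      intro hc
      exact hne (List.length_eq_zero_iff.mp (by exact_mod_cast hc))
    rw [if_neg hlen, hm]
    -- m = altLoop N sqrt
    have h1 : m ≤ altLoop N (Nat.sqrt N.toNat) := PySem.List.min?_isMin hm _ hmem
    have h2 : altLoop N (Nat.sqrt N.toNat) ≤ m := by
      have hmmem := PySem.List.min?_mem hm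
      obtain ⟨i, hi1, hi2, hi3, rfl⟩ := mem_lstA.mp hmmem
      calc altLoop N (Nat.sqrt N.toNat)
          ≤ PySem.Str.len (PySem.Int.toStr (PySem.Int.floordiv N i)) := hlb i hi1 hi2 hi3
        _ ≤ max _ _ := le_max_right _ _
    simp only [Option.getD_some]
    omega
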